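-- pv_equiv track=rewrite | github.com/pypi-data/pypi-mirror-65 | packages/dv-pyclient/dv_pyclient-0.2.1.tar.gz/dv_pyclient-0.2.1/dv_pyclient/dv_pyclient.py | __getDataLoadMappings
-- ===== SOURCE A (Python) =====
-- def __isTimeDataType(dataType):
--     return dataType in frozenset(['TimeColumnConfig', 'StaticTimeConfig'])
--
-- def __isStringDataType(dataType):
--     return dataType in frozenset(['StringColumnConfig', 'StaticStringConfig'])
--
-- def __isNumberDataType(dataType):
--     return dataType in frozenset(['NumberColumnConfig', 'StaticNumberConfig'])
--
-- def __getDataLoadMappings(columnConfigs, valueModifiers):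
--     stringColumns = list(
--         filter(lambda c: __isStringDataType(c['dataType']), columnConfigs))
--     keyColumns = list(filter(lambda s: not (s in valueModifiers), stringColumns))
--     timeColumns = list(
--         filter(lambda c: __isTimeDataType(c['dataType']), columnConfigs))
--     valueColumns = list(
--         filter(lambda c: __isNumberDataType(c['dataType']), columnConfigs))
--     timeTuples = []
--     for v in valueColumns:
--         for t in timeColumns:
--             timeTuples.append(
--                 {'timeColumn': t['name'], 'valueColumn': v['name']}
--             )
--
--     return stringColumns, keyColumns, timeColumns, valueColumns, timeTuples
-- ===== SOURCE B (Python) =====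
-- def __getDataLoadMappings(columnConfigs, valueModifiers):
--     stringColumns, timeColumns, valueColumns = [], [], []
--     for c in columnConfigs:
--         dt = c['dataType']
--         if dt in ('StringColumnConfig', 'StaticStringConfig'):
--             stringColumns.append(c)
--         elif dt in ('TimeColumnConfig', 'StaticTimeConfig'):
--             timeColumns.append(c)
--         elif dt in ('NumberColumnConfig', 'StaticNumberConfig'):
--             valueColumns.append(c)
--     keyColumns = [s for s in stringColumns if s not in valueModifiers]
--     timeTuples = [{'timeColumn': t['name'], 'valueColumn': v['name']}
--                   for v in valueColumns for t in timeColumns]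
--     return stringColumns, keyColumns, timeColumns, valueColumns, timeTuples
-- ===== Notes on version B (the rewrite author's own statement) =====
-- stated objective: alternative
-- what changed: B classifies every column in a single branching pass over columnConfigs (three accumulators) instead of A's three separate filter passes, and builds keyColumns/timeTuples with comprehensions instead of filter()/nested append loops.
import Mathlib
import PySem

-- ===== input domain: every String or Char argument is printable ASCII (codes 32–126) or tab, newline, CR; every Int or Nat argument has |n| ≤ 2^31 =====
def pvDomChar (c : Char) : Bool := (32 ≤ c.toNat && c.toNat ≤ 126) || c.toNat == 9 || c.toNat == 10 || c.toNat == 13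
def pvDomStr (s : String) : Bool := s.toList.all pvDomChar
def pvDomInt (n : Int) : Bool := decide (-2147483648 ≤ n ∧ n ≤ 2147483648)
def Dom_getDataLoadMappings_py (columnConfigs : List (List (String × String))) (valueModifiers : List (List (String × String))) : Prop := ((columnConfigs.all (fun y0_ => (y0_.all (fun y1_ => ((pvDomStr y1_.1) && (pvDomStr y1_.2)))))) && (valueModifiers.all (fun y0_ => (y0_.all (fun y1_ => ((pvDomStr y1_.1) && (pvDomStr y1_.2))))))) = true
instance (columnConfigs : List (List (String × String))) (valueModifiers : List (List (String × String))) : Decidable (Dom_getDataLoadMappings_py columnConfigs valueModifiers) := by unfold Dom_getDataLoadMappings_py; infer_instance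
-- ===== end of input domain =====

-- B replaces A's three filter passes by one branching classification pass over columnConfigs
-- (plus comprehension-style keyColumns/timeTuples); same return value, similar cost ("alternative").


-- shared Python-semantics primitives (dict lookup `d[k]` totalised with "" — Pre_ keeps us
-- where the key exists — and Python's `==` on dicts, which ignores insertion order)
def pyLookup (d : List (String × String)) (k : String) : String :=
  PySem.Dict.getD (PySem.Dict.mk d) k ""

def pyDictEq (x y : List (String × String)) : Bool :=
  x.all (fun p => (PySem.Dict.mk y).get? p.1 == some p.2) &&
  y.all (fun p => (PySem.Dict.mk x).get? p.1 == some p.2)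

-- ===== PORT A =====
def isTimeDataType (dt : String) : Bool := dt == "TimeColumnConfig" || dt == "StaticTimeConfig"
def isStringDataType (dt : String) : Bool := dt == "StringColumnConfig" || dt == "StaticStringConfig"
def isNumberDataType (dt : String) : Bool := dt == "NumberColumnConfig" || dt == "StaticNumberConfig"

def getDataLoadMappings_py (columnConfigs : List (List (String × String))) (valueModifiers : List (List (String × String))) : List (List (List (String × String))) :=
  let stringColumns := columnConfigs.filter (fun c => isStringDataType (pyLookup c "dataType"))
  let keyColumns := stringColumns.filter (fun s => !(valueModifiers.any (fun m => pyDictEq s m)))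
  let timeColumns := columnConfigs.filter (fun c => isTimeDataType (pyLookup c "dataType"))
  let valueColumns := columnConfigs.filter (fun c => isNumberDataType (pyLookup c "dataType"))
  let timeTuples := valueColumns.foldl (fun acc v =>
      timeColumns.foldl (fun acc t =>
        acc ++ [[("timeColumn", pyLookup t "name"), ("valueColumn", pyLookup v "name")]]) acc) []
  [stringColumns, keyColumns, timeColumns, valueColumns, timeTuples]

-- ===== PORT B =====
def getDataLoadMappings_py_alt (columnConfigs : List (List (String × String))) (valueModifiers : List (List (String × String))) : List (List (List (String × String))) :=
  let cls := columnConfigs.foldl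
    (fun (acc : List (List (String × String)) × List (List (String × String)) × List (List (String × String))) c =>
      let dt := pyLookup c "dataType"
      if dt == "StringColumnConfig" || dt == "StaticStringConfig" then (acc.1 ++ [c], acc.2.1, acc.2.2)
      else if dt == "TimeColumnConfig" || dt == "StaticTimeConfig" then (acc.1, acc.2.1 ++ [c], acc.2.2)
      else if dt == "NumberColumnConfig" || dt == "StaticNumberConfig" then (acc.1, acc.2.1, acc.2.2 ++ [c])
      else acc)
    ([], [], [])
  let stringColumns := cls.1
  let timeColumns := cls.2.1
  let valueColumns := cls.2.2
  let keyColumns := stringColumns.filter (fun s => !(valueModifiers.any (fun m => pyDictEq s m)))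
  let timeTuples := valueColumns.flatMap (fun v =>
      timeColumns.map (fun t => [("timeColumn", pyLookup t "name"), ("valueColumn", pyLookup v "name")]))
  [stringColumns, keyColumns, timeColumns, valueColumns, timeTuples]

-- ===== PRECONDITION & SPEC =====
-- Pre_ excludes (a) inputs where Python raises KeyError: a column without 'dataType', or a
-- time/number column without 'name' when both a time and a number column are present; and
-- (b) association lists with duplicate keys, which denote no Python dict at all (every
-- Python dict is a duplicate-free list here, so (b) excludes nothing A is ever given).
def Pre_getDataLoadMappings_py (columnConfigs : List (List (String × String))) (valueModifiers : List (List (String × String))) : Prop :=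
  (∀ c ∈ columnConfigs, (c.map Prod.fst).Nodup ∧ c.any (fun p => p.1 == "dataType") = true) ∧
  (∀ m ∈ valueModifiers, (m.map Prod.fst).Nodup) ∧
  ((columnConfigs.any (fun c => isTimeDataType (pyLookup c "dataType")) = true ∧
    columnConfigs.any (fun c => isNumberDataType (pyLookup c "dataType")) = true) →
   ∀ c ∈ columnConfigs, (isTimeDataType (pyLookup c "dataType") || isNumberDataType (pyLookup c "dataType")) = true →
     c.any (fun p => p.1 == "name") = true)

instance (columnConfigs : List (List (String × String))) (valueModifiers : List (List (String × String))) : Decidable (Pre_getDataLoadMappings_py columnConfigs valueModifiers) := by unfold Pre_getDataLoadMappings_py; infer_instance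

def pvWitness_getDataLoadMappings_py : (List (List (String × String))) × (List (List (String × String))) :=
  ([[("dataType", "StringColumnConfig"), ("name", "s")],
    [("dataType", "TimeColumnConfig"), ("name", "t")],
    [("dataType", "NumberColumnConfig"), ("name", "v")]],
   [[("dataType", "StringColumnConfig"), ("name", "s")]])

def Spec_getDataLoadMappings_py (columnConfigs : List (List (String × String))) (valueModifiers : List (List (String × String))) (out : List (List (List (String × String)))) : Prop := out = getDataLoadMappings_py_alt columnConfigs valueModifiers
instance (columnConfigs : List (List (String × String))) (valueModifiers : List (List (String × String))) (out : List (List (List (String × String)))) : Decidable (Spec_getDataLoadMappings_py columnConfigs valueModifiers out) := by unfold Spec_getDataLoadMappings_py; infer_instance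

-- ===== CLAIM (what is proved, stated in full; the proofs are below) =====
def Claim_equal_getDataLoadMappings_py : Prop := ∀ (columnConfigs : List (List (String × String))) (valueModifiers : List (List (String × String))), Dom_getDataLoadMappings_py columnConfigs valueModifiers → Pre_getDataLoadMappings_py columnConfigs valueModifiers → Spec_getDataLoadMappings_py columnConfigs valueModifiers (getDataLoadMappings_py columnConfigs valueModifiers)

-- ===== LEMMAS AND PROOFS =====

-- the three dataType tests are pairwise exclusive (on any string)
theorem string_not_time (s : String) (h : isStringDataType s = true) : isTimeDataType s = false := by
  simp [isStringDataType] at h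
  rcases h with h | h <;> subst h <;> decide

theorem string_not_number (s : String) (h : isStringDataType s = true) : isNumberDataType s = false := by
  simp [isStringDataType] at h
  rcases h with h | h <;> subst h <;> decide

theorem time_not_number (s : String) (h : isTimeDataType s = true) : isNumberDataType s = false := by
  simp [isTimeDataType] at h
  rcases h with h | h <;> subst h <;> decide

-- B's single classification fold computes the three filters of A
theorem classify_foldl {α : Type} (p q r : α → Bool)
    (hpq : ∀ c, p c = true → q c = false) (hpr : ∀ c, p c = true → r c = false)
    (hqr : ∀ c, q c = true → r c = false) :
    ∀ (l : List α) (ss ts vs : List α),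
    l.foldl (fun (acc : List α × List α × List α) c =>
        if p c then (acc.1 ++ [c], acc.2.1, acc.2.2)
        else if q c then (acc.1, acc.2.1 ++ [c], acc.2.2)
        else if r c then (acc.1, acc.2.1, acc.2.2 ++ [c])
        else acc) (ss, ts, vs)
      = (ss ++ l.filter p, ts ++ l.filter q, vs ++ l.filter r) := by
  intro l
  induction l with
  | nil => intro ss ts vs; simp
  | cons c l ih =>
    intro ss ts vs
    by_cases hp : p c = true
    · simp [List.foldl_cons, hp, ih, hpq c hp, hpr c hp]
    · by_cases hq : q c = true
      · simp [List.foldl_cons, hp, hq, ih, hqr c hq]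
      · by_cases hr : r c = true
        · simp [List.foldl_cons, hp, hq, hr, ih]
        · simp [List.foldl_cons, hp, hq, hr, ih]

-- A's nested append loop builds the flatMap/map cross product of B
theorem timeTuples_loop {α β : Type} (vs ts : List α) (g : α → α → β) :
    vs.foldl (fun acc v => ts.foldl (fun acc t => acc ++ [g v t]) acc) []
      = vs.flatMap (fun v => ts.map (fun t => g v t)) := by
  have h : (fun (acc : List β) v => ts.foldl (fun acc t => acc ++ [g v t]) acc)
      = fun acc v => acc ++ ts.map (fun t => g v t) := by
    funext acc v
    exact PySem.List.foldl_append_singleton_eq_map (fun t => g v t) ts acc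
  rw [h]
  simpa using PySem.List.foldl_append_eq_flatMap (fun v => ts.map (fun t => g v t)) (l := vs) (acc := [])

-- ===== VERDICT (by name: the statement is the Claim_ definition above) =====
theorem getDataLoadMappings_py_spec : Claim_equal_getDataLoadMappings_py := by
  intro columnConfigs valueModifiers _ _
  unfold Spec_getDataLoadMappings_py
  simp only [getDataLoadMappings_py, getDataLoadMappings_py_alt,
             isStringDataType, isTimeDataType, isNumberDataType]
  have hc := classify_foldl
      (fun c => pyLookup c "dataType" == "StringColumnConfig" || pyLookup c "dataType" == "StaticStringConfig")
      (fun c => pyLookup c "dataType" == "TimeColumnConfig" || pyLookup c "dataType" == "StaticTimeConfig")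
      (fun c => pyLookup c "dataType" == "NumberColumnConfig" || pyLookup c "dataType" == "StaticNumberConfig")
      (fun c h => string_not_time _ h) (fun c h => string_not_number _ h)
      (fun c h => time_not_number _ h)
      columnConfigs [] [] []
  rw [hc, timeTuples_loop]
  simp
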